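-- pv_equiv track=rewrite | github.com/jaeyeongs/baekjoon | 프로그래머스/1/82612. 부족한 금액 계산하기/부족한 금액 계산하기.py | solution
-- ===== SOURCE A (Python) =====
-- def solution(price, money, count):
--     fee = 0
--     for i in range(1, count+1):
--         fee += price * i
--
--     if fee > money:
--         return fee - money
--     else:
--         return 0
-- ===== SOURCE B (Python) =====
-- def solution(price, money, count):
--     n = count if count > 0 else 0
--     fee = price * n * (n + 1) // 2
--     return fee - money if fee > money else 0
-- ===== Notes on version B (the rewrite author's own statement) =====
-- stated objective: faster
-- what changed: Replaces the O(count) loop summing price*i with the closed-form arithmetic series price*n*(n+1)//2.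
import Mathlib
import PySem

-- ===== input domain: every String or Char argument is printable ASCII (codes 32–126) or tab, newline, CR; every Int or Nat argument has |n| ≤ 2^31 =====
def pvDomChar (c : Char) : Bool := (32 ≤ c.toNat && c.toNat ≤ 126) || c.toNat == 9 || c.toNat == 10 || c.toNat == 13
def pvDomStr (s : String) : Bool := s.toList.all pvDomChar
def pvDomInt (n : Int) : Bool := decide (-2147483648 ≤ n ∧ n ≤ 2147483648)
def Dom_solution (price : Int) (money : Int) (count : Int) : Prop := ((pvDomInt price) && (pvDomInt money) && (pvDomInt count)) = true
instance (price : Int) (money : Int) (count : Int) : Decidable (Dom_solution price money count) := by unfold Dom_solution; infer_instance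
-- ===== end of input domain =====

-- B replaces A's O(count) summation loop with the closed-form arithmetic series price*n*(n+1)//2 (faster in a timing run).

-- ===== PORT A =====
def solution (price : Int) (money : Int) (count : Int) : Int :=
  let fee := (PySem.List.pyRange 1 (count + 1) 1).foldl (fun fee i => fee + price * i) 0
  if fee > money then fee - money else 0

-- ===== PORT B =====
def solution_alt (price : Int) (money : Int) (count : Int) : Int :=
  let n := if count > 0 then count else 0
  let fee := PySem.Int.floordiv (price * n * (n + 1)) 2
  if fee > money then fee - money else 0

-- ===== PRECONDITION & SPEC =====
def Spec_solution (price : Int) (money : Int) (count : Int) (out : Int) : Prop := out = solution_alt price money count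
instance (price : Int) (money : Int) (count : Int) (out : Int) : Decidable (Spec_solution price money count out) := by unfold Spec_solution; infer_instance

-- ===== CLAIM (what is proved, stated in full; the proofs are below) =====
def Claim_equal_solution : Prop := ∀ (price : Int) (money : Int) (count : Int), Dom_solution price money count → Spec_solution price money count (solution price money count)

-- ===== LEMMAS AND PROOFS =====

-- the loop computes the triangular-number sum
theorem pv_sum_loop (price : Int) : ∀ (n : Nat) (acc : Int),
    (PySem.List.pyRange 1 ((n : Int) + 1) 1).foldl (fun fee i => fee + price * i) acc
      = acc + price * ((n * (n + 1) / 2 : Nat) : Int) := by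
  intro n
  induction n with
  | zero => intro acc; rw [PySem.List.pyRange_one_eq_nil (by norm_num)]; simp
  | succ m ih =>
    intro acc
    have h : ((m + 1 : Nat) : Int) + 1 = ((m : Int) + 1) + 1 := by push_cast; ring
    rw [h, PySem.List.pyRange_one_succ_right (by omega), List.foldl_append]
    simp only [List.foldl]
    rw [ih]
    have hT : ((m + 1) * (m + 1 + 1) / 2 : Nat) = (m * (m + 1) / 2 : Nat) + (m + 1) := by
      have hmul : (m + 1) * (m + 1 + 1) = m * (m + 1) + 2 * (m + 1) := by ring
      omega
    rw [hT]
    push_cast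
    ring

theorem solution_spec : Claim_equal_solution := by
  unfold Claim_equal_solution Spec_solution
  intro price money count _
  have hfee : (PySem.List.pyRange 1 (count + 1) 1).foldl (fun fee i => fee + price * i) 0
      = PySem.Int.floordiv (price * (if count > 0 then count else 0) * ((if count > 0 then count else 0) + 1)) 2 := by
    by_cases hc : count ≤ 0
    · rw [PySem.List.pyRange_one_eq_nil (by omega), if_neg (by omega)]
      simp [PySem.Int.floordiv]
    · have hc' : 0 < count := by omega
      rw [if_pos hc']
      obtain ⟨n, rfl⟩ : ∃ n : Nat, count = (n : Int) := ⟨count.toNat, (Int.toNat_of_nonneg hc'.le).symm⟩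
      rw [pv_sum_loop price n 0, PySem.Int.floordiv_eq_ediv_of_pos (by norm_num)]
      have h2 : price * (n : Int) * ((n : Int) + 1) = 2 * (price * ((n * (n + 1) / 2 : Nat) : Int)) := by
        obtain ⟨k, hk⟩ := Nat.even_mul_succ_self n
        have h : (n * (n + 1) : Nat) = 2 * (n * (n + 1) / 2 : Nat) := by omega
        have hcast : ((n * (n + 1) : Nat) : Int) = 2 * ((n * (n + 1) / 2 : Nat) : Int) := by
          exact_mod_cast h
        calc price * (n : Int) * ((n : Int) + 1) = price * ((n * (n + 1) : Nat) : Int) := by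
              push_cast; ring
          _ = price * (2 * ((n * (n + 1) / 2 : Nat) : Int)) := by rw [hcast]
          _ = 2 * (price * ((n * (n + 1) / 2 : Nat) : Int)) := by ring
      rw [h2, Int.mul_ediv_cancel_left _ (by norm_num)]
      ring
  simp only [solution, solution_alt, hfee]
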